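-- pv_equiv track=rewrite | github.com/xionglei191-goo/vanke_chk_list | auto_review_system/rag_engine/vector_store.py | get_wbs_inheritance
-- ===== SOURCE A (Python) =====
-- def get_wbs_inheritance(wbs_code):
--     """
--     分解 WBS 码的所有父级血缘。
--     例如输入: "04-03-01"，输出: ["04-03-01", "04-03", "04", "通用"]
--     """
--     if not wbs_code or wbs_code == "通用":
--         return ["通用"]
--
--     parts = wbs_code.split("-")
--     ancestry = []
--     current = ""
--     for p in parts:
--         if current:
--             current += "-" + p
--         else:
--             current = p
--         ancestry.append(current)
--
--     ancestry.reverse() # 最明确的子节点放在最前面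
--     ancestry.append("通用")
--     return ancestry
-- ===== SOURCE B (Python) =====
-- def get_wbs_inheritance(wbs_code):
--     if not wbs_code or wbs_code == "通用":
--         return ["通用"]
--     parts = wbs_code.split("-")
--     return ["-".join(parts[:i]) for i in range(len(parts), 0, -1)] + ["通用"]
-- ===== Notes on version B (the rewrite author's own statement) =====
-- stated objective: idiomatic
-- what changed: Replaces A's running-accumulator loop plus in-place reverse with a single comprehension that recomputes each ancestor independently by joining the slice parts[:i] for i from len(parts) down to 1, so no mutable state or reversal is needed.
-- intended difference: On codes starting with a dash, A's falsy-current branch silently drops the leading dash so the head of its list is not the input code, while B returns the code itself as the most specific ancestor, which is the intended ancestry list; at the witness '-04' A gives ['04','','通用'] and B ['-04','','通用']. — e.g. on get_wbs_inheritance("-04"): A returns ["04", "", "通用"], B returns ["-04", "", "通用"]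
import Mathlib
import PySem

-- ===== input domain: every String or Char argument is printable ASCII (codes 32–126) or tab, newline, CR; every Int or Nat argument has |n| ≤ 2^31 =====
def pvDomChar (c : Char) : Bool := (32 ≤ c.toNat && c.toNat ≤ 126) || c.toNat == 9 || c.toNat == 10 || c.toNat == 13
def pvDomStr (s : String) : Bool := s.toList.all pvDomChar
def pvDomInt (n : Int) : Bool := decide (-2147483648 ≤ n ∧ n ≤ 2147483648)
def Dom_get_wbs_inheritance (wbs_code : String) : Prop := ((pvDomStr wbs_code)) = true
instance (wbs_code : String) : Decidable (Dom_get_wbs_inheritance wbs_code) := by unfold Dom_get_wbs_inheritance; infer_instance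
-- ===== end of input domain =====

-- B replaces A's running-accumulator-then-reverse loop by independent slice-joins emitted
-- directly in descending order; on codes starting with a dash B keeps the full code where
-- A silently drops the leading dash (stated as D_ below).

-- ===== PORT A =====
-- loop body of A's for-loop, as a helper
def stepA (st : List String × String) (p : String) : List String × String :=
  let current := if st.2 ≠ "" then st.2 ++ "-" ++ p else p
  (st.1 ++ [current], current)

def get_wbs_inheritance (wbs_code : String) : List String :=
  if wbs_code = "" ∨ wbs_code = "通用" then ["通用"]
  else
    let parts := (PySem.Str.split? wbs_code "-").getD []
    let st := parts.foldl stepA ([], "")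
    st.1.reverse ++ ["通用"]

-- ===== PORT B =====
def get_wbs_inheritance_alt (wbs_code : String) : List String :=
  if wbs_code = "" ∨ wbs_code = "通用" then ["通用"]
  else
    let parts := (PySem.Str.split? wbs_code "-").getD []
    ((PySem.List.pyRange (parts.length : Int) 0 (-1)).map
      (fun i => PySem.Str.join "-" (PySem.List.slice parts none (some i)))) ++ ["通用"]

-- ===== PRECONDITION & SPEC =====
-- On codes that start with a dash, A's falsy-current branch silently drops the leading dash
-- (its first list entry is no longer the input code) while B returns the code itself as the
-- most specific ancestor, which is the intended ancestry list.
def D_get_wbs_inheritance (wbs_code : String) : Prop := wbs_code.toList.head? = some '-'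
instance (wbs_code : String) : Decidable (D_get_wbs_inheritance wbs_code) := by unfold D_get_wbs_inheritance; infer_instance

def Spec_get_wbs_inheritance (wbs_code : String) (out : List String) : Prop :=
  ¬ D_get_wbs_inheritance wbs_code → out = get_wbs_inheritance_alt wbs_code
instance (wbs_code : String) (out : List String) : Decidable (Spec_get_wbs_inheritance wbs_code out) := by unfold Spec_get_wbs_inheritance; infer_instance

def pvDiffWitness_get_wbs_inheritance : String := "-04"
def pvDiffWitnessOut_get_wbs_inheritance : (List String) × (List String) :=
  (["04", "", "通用"], ["-04", "", "通用"])

-- ===== CLAIM (what is proved, stated in full; the proofs are below) =====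
def Claim_unchanged_get_wbs_inheritance : Prop := ∀ (wbs_code : String), Dom_get_wbs_inheritance wbs_code → Spec_get_wbs_inheritance wbs_code (get_wbs_inheritance wbs_code)
def Claim_changed_get_wbs_inheritance : Prop := Dom_get_wbs_inheritance (pvDiffWitness_get_wbs_inheritance) ∧ D_get_wbs_inheritance (pvDiffWitness_get_wbs_inheritance) ∧ get_wbs_inheritance (pvDiffWitness_get_wbs_inheritance) = pvDiffWitnessOut_get_wbs_inheritance.1 ∧ get_wbs_inheritance_alt (pvDiffWitness_get_wbs_inheritance) = pvDiffWitnessOut_get_wbs_inheritance.2 ∧ pvDiffWitnessOut_get_wbs_inheritance.1 ≠ pvDiffWitnessOut_get_wbs_inheritance.2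
def Claim_exact_get_wbs_inheritance : Prop := ∀ (wbs_code : String), Dom_get_wbs_inheritance wbs_code → D_get_wbs_inheritance wbs_code → get_wbs_inheritance wbs_code ≠ get_wbs_inheritance_alt wbs_code

-- ===== LEMMAS AND PROOFS =====

theorem go_acc (sep : List Char) (fuel : Nat) : ∀ (l cur : List Char) (acc : List (List Char)),
    PySem.Chars.splitOn.go sep fuel l cur acc = acc.reverse ++ PySem.Chars.splitOn.go sep fuel l cur [] := by
  induction fuel with
  | zero => intro l cur acc; simp [PySem.Chars.splitOn.go]
  | succ f ih =>
    intro l cur acc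
    cases l with
    | nil => simp [PySem.Chars.splitOn.go]
    | cons c rest =>
      rw [PySem.Chars.splitOn.go, PySem.Chars.splitOn.go]
      split
      · rw [ih _ _ (cur.reverse :: acc), ih _ _ [cur.reverse]]
        simp
      · exact ih _ _ _

theorem go_ne_nil (sep : List Char) (fuel : Nat) : ∀ (l cur : List Char) (acc : List (List Char)),
    PySem.Chars.splitOn.go sep fuel l cur acc ≠ [] := by
  induction fuel with
  | zero => intro l cur acc; simp [PySem.Chars.splitOn.go]
  | succ f ih =>
    intro l cur acc
    cases l with
    | nil => simp [PySem.Chars.splitOn.go]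
    | cons c rest =>
      rw [PySem.Chars.splitOn.go]
      split
      · exact ih _ _ _
      · exact ih _ _ _

theorem join_cons_of_ne_nil (sep x : List Char) (ys : List (List Char)) (h : ys ≠ []) :
    PySem.Chars.join sep (x :: ys) = x ++ sep ++ PySem.Chars.join sep ys := by
  cases ys with
  | nil => exact absurd rfl h
  | cons q rest => exact PySem.Chars.join_cons_cons sep x q rest

theorem join_go (sep : List Char) (hsep : sep ≠ []) (fuel : Nat) :
    ∀ (l cur : List Char), l.length < fuel →
    PySem.Chars.join sep (PySem.Chars.splitOn.go sep fuel l cur []) = cur.reverse ++ l := by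
  induction fuel with
  | zero => intro l cur h; omega
  | succ f ih =>
    intro l cur h
    cases l with
    | nil =>
      simp [PySem.Chars.splitOn.go, PySem.Chars.join_singleton]
    | cons c rest =>
      rw [PySem.Chars.splitOn.go]
      split
      · rename_i hpre
        obtain ⟨tl, htl⟩ := List.isPrefixOf_iff_prefix.mp hpre
        have hsl : 0 < sep.length := List.length_pos_iff.mpr hsep
        rw [go_acc]
        simp only [List.reverse_singleton, List.singleton_append]
        rw [join_cons_of_ne_nil _ _ _ (go_ne_nil sep f _ [] [])]
        have hlen : (List.drop sep.length (c :: rest)).length < f := by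
          rw [List.length_drop]; simp only [List.length_cons] at h ⊢; omega
        rw [ih _ _ hlen]
        have hdrop : List.drop sep.length (c :: rest) = tl := by
          rw [← htl]; simp
        rw [hdrop, ← htl, List.append_assoc]
        simp
      · rw [ih _ _ (by simp only [List.length_cons] at h ⊢; omega)]
        simp

theorem join_splitOn (s sep : List Char) (hsep : sep ≠ []) :
    PySem.Chars.join sep (PySem.Chars.splitOn s sep) = s := by
  unfold PySem.Chars.splitOn
  have h := join_go sep hsep (s.length + 1) s [] (by omega)
  simpa using h

theorem splitOn_ne_nil (s sep : List Char) : PySem.Chars.splitOn s sep ≠ [] :=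
  go_ne_nil sep (s.length + 1) s [] []

-- Str-level join facts
theorem str_join_singleton (sep x : String) : PySem.Str.join sep [x] = x := by
  rw [← String.toList_inj, PySem.Str.toList_join]
  simp [PySem.Chars.join_singleton]

theorem str_join_snoc (sep q : String) (xs : List String) (h : xs ≠ []) :
    PySem.Str.join sep (xs ++ [q]) = PySem.Str.join sep xs ++ sep ++ q := by
  rw [← String.toList_inj, PySem.Str.toList_join]
  simp only [String.toList_append, PySem.Str.toList_join, List.map_append, List.map_cons, List.map_nil]
  induction xs with
  | nil => exact absurd rfl h
  | cons p t ih =>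
    cases t with
    | nil => simp [PySem.Chars.join_cons_cons, PySem.Chars.join_singleton]
    | cons r t' =>
      rw [List.map_cons, List.cons_append,
          join_cons_of_ne_nil _ _ _ (by simp),
          join_cons_of_ne_nil _ _ _ (by simp),
          ih (by simp)]
      simp [List.append_assoc]

theorem str_ne_empty_iff (s : String) : s ≠ "" ↔ s.toList ≠ [] :=
  not_congr (by
    constructor
    · intro h; subst h; rfl
    · intro h; exact String.toList_inj.mp (by simpa using h))

-- the A-side fold characterised
theorem foldA_go (t : List String) : ∀ (acc : List String) (pref : List String) (cur : String),
    pref ≠ [] → cur = PySem.Str.join "-" pref → cur ≠ "" →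
    (t.foldl stepA (acc, cur)).1
      = acc ++ (List.range t.length).map (fun k => PySem.Str.join "-" (pref ++ t.take (k + 1))) := by
  induction t with
  | nil => intro acc pref cur _ _ _; simp
  | cons q t ih =>
    intro acc pref cur hpref hcur hne
    rw [List.foldl_cons, show stepA (acc, cur) q = (acc ++ [cur ++ "-" ++ q], cur ++ "-" ++ q) by
      simp [stepA, hne]]
    have hjoin : cur ++ "-" ++ q = PySem.Str.join "-" (pref ++ [q]) := by
      rw [str_join_snoc _ _ _ hpref, ← hcur]
    have hne' : cur ++ "-" ++ q ≠ "" := by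
      rw [str_ne_empty_iff]
      simp [String.toList_append]
    rw [ih (acc ++ [cur ++ "-" ++ q]) (pref ++ [q]) _ (by simp) hjoin hne']
    rw [List.length_cons, List.range_succ_eq_map]
    simp only [List.map_cons, List.map_map]
    rw [List.append_assoc]
    congr 1
    rw [List.singleton_append]
    congr 1
    apply List.map_congr_left
    intro k _
    simp [Function.comp, List.take_succ_cons, List.append_assoc]

theorem foldA (p : String) (t : List String) (hp : p ≠ "") :
    ((p :: t).foldl stepA ([], "")).1
      = (List.range (p :: t).length).map (fun k => PySem.Str.join "-" ((p :: t).take (k + 1))) := by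
  rw [List.foldl_cons, show stepA ([], "") p = ([p], p) by simp [stepA]]
  rw [foldA_go t [p] [p] p (by simp) (by rw [str_join_singleton]) hp]
  rw [List.length_cons, List.range_succ_eq_map]
  simp only [List.map_cons, List.map_map]
  rw [List.singleton_append]
  congr 1
  rw [List.take_succ_cons, List.take_zero, str_join_singleton]

-- the B-side comprehension characterised
theorem altList (parts : List String) :
    ((PySem.List.pyRange (parts.length : Int) 0 (-1)).map
      (fun i => PySem.Str.join "-" (PySem.List.slice parts none (some i))))
    = ((List.range parts.length).map (fun k => PySem.Str.join "-" (parts.take (k + 1)))).reverse := by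
  rw [PySem.List.pyRange_neg_one_eq_reverse, PySem.List.pyRange_one, List.map_reverse, List.map_map]
  congr 1
  have hn : (((parts.length : Int) + 1 - (0 + 1)).toNat) = parts.length := by omega
  rw [hn]
  apply List.map_congr_left
  intro k _
  simp only [Function.comp]
  have h1 : (0 : Int) + 1 + (k : Int) = ((k + 1 : Nat) : Int) := by push_cast; ring
  rw [h1, PySem.List.slice_to_natCast]

-- what Str.split? on "-" yields, at the Chars level
theorem split_parts (s : String) : ∃ parts, PySem.Str.split? s "-" = some parts ∧
    parts.map String.toList = PySem.Chars.splitOn s.toList ['-'] := by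
  have hb := PySem.Str.split?_map s "-"
  have hsep : ("-" : String).toList = ['-'] := rfl
  rw [hsep] at hb
  rw [show PySem.Chars.split? s.toList ['-'] = some (PySem.Chars.splitOn s.toList ['-']) from by
    simp [PySem.Chars.split?]] at hb
  cases hsp : PySem.Str.split? s "-" with
  | none => rw [hsp] at hb; simp at hb
  | some parts => rw [hsp] at hb; simp at hb; exact ⟨parts, rfl, hb⟩

-- the split parts: first part nonempty when the code does not start with '-'
theorem parts_head (s : String) (hs : s ≠ "") (hh : s.toList.head? ≠ some '-') :
    ∃ p t, (PySem.Str.split? s "-").getD [] = p :: t ∧ p ≠ "" := by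
  obtain ⟨parts, hp, hmap⟩ := split_parts s
  have hjoin := join_splitOn s.toList ['-'] (by simp)
  have hnn := splitOn_ne_nil s.toList ['-']
  rw [hp]
  cases parts with
  | nil => simp at hmap; rw [← hmap] at hnn; exact absurd rfl hnn
  | cons p t =>
    refine ⟨p, t, rfl, ?_⟩
    intro hpe
    subst hpe
    rw [← hmap] at hjoin
    cases t with
    | nil =>
      simp [PySem.Chars.join_singleton] at hjoin
      exact hs (String.toList_inj.mp (by simp [← hjoin]))
    | cons q t' =>
      rw [List.map_cons, join_cons_of_ne_nil _ _ _ (by simp)] at hjoin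
      apply hh
      rw [← hjoin]
      simp


-- pieces produced by splitOn on a single-char separator never contain that separator
theorem go_no_sep (fuel : Nat) : ∀ (l cur : List Char) (acc : List (List Char)),
    l.length < fuel → (∀ a ∈ acc, '-' ∉ a) → '-' ∉ cur →
    ∀ piece ∈ PySem.Chars.splitOn.go ['-'] fuel l cur acc, '-' ∉ piece := by
  induction fuel with
  | zero => intro l cur acc h; omega
  | succ f ih =>
    intro l cur acc h hacc hcur piece hp
    cases l with
    | nil =>
      simp [PySem.Chars.splitOn.go] at hp
      rcases hp with hp | hp
      · exact hacc _ hp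
      · subst hp; simpa using hcur
    | cons c rest =>
      rw [PySem.Chars.splitOn.go] at hp
      split at hp
      · rename_i hpre
        have hlen : (List.drop (['-'] : List Char).length (c :: rest)).length < f := by
          simp only [List.length_cons, List.length_drop] at h ⊢
          omega
        refine ih _ _ _ hlen ?_ (List.not_mem_nil) piece hp
        intro a ha
        rcases List.mem_cons.mp ha with h1 | h1
        · subst h1; simpa using hcur
        · exact hacc _ h1
      · rename_i hpre
        have hc : c ≠ '-' := by
          simp [List.isPrefixOf] at hpre
          exact fun h => hpre h.symm
        refine ih _ _ _ ?_ hacc ?_ piece hp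
        · simp only [List.length_cons] at h; omega
        · simp [hcur]; exact fun h => hc h.symm

theorem splitOn_no_sep (s : List Char) :
    ∀ piece ∈ PySem.Chars.splitOn s ['-'], '-' ∉ piece := by
  unfold PySem.Chars.splitOn
  exact go_no_sep (s.length + 1) s [] [] (by omega) (by simp) (by simp)

-- the running current never starts with '-' when no part contains '-'
theorem fold2_head (t : List String) : ∀ (acc : List String) (cur : String),
    (∀ x ∈ t, '-' ∉ x.toList) → cur.toList.head? ≠ some '-' →
    ((t.foldl stepA (acc, cur)).2).toList.head? ≠ some '-' := by
  induction t with
  | nil => intro acc cur _ hcur; exact hcur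
  | cons q t ih =>
    intro acc cur ht hcur
    rw [List.foldl_cons]
    by_cases hce : cur = ""
    · subst hce
      rw [show stepA (acc, "") q = (acc ++ [q], q) by simp [stepA]]
      refine ih _ _ (fun x hx => ht x (List.mem_cons_of_mem _ hx)) ?_
      intro hq
      have hqn : '-' ∉ q.toList := ht q List.mem_cons_self
      cases hql : q.toList with
      | nil => rw [hql] at hq; simp at hq
      | cons a l =>
        rw [hql] at hq
        simp at hq
        exact hqn (by rw [hql, hq]; exact List.mem_cons_self)
    · rw [show stepA (acc, cur) q = (acc ++ [cur ++ "-" ++ q], cur ++ "-" ++ q) by simp [stepA, hce]]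
      refine ih _ _ (fun x hx => ht x (List.mem_cons_of_mem _ hx)) ?_
      rw [String.toList_append, String.toList_append,
          List.head?_append_of_ne_nil _ (by simp [(str_ne_empty_iff cur).mp hce]),
          List.head?_append_of_ne_nil _ ((str_ne_empty_iff cur).mp hce)]
      exact hcur

-- the last element accumulated by the loop is the final current
theorem fold1_last (t : List String) : ∀ (acc : List String) (cur : String), t ≠ [] →
    ((t.foldl stepA (acc, cur)).1).getLast? = some ((t.foldl stepA (acc, cur)).2) := by
  induction t with
  | nil => intro acc cur h; exact absurd rfl h
  | cons q t ih =>
    intro acc cur _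
    rw [List.foldl_cons]
    cases t with
    | nil =>
      rw [show stepA (acc, cur) q = (acc ++ [if cur ≠ "" then cur ++ "-" ++ q else q],
        if cur ≠ "" then cur ++ "-" ++ q else q) from rfl]
      simp only [List.foldl_nil, List.getLast?_concat]
    | cons r t' => exact ih _ _ (by simp)

theorem get_wbs_inheritance_tight_aux (s : String)
    (hD : s.toList.head? = some '-') :
    get_wbs_inheritance s ≠ get_wbs_inheritance_alt s := by
  have hs1 : s ≠ "" := by intro h; subst h; simp at hD
  have hs2 : s ≠ "通用" := by intro h; rw [h] at hD; exact absurd hD (by decide)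
  unfold get_wbs_inheritance get_wbs_inheritance_alt
  rw [if_neg (not_or.mpr ⟨hs1, hs2⟩), if_neg (not_or.mpr ⟨hs1, hs2⟩)]
  obtain ⟨parts, hsp, hmap⟩ := split_parts s
  simp only [hsp, Option.getD_some]
  intro heq
  -- compare heads of the two result lists
  have hpn : parts ≠ [] := by
    intro h
    rw [h] at hmap
    exact splitOn_ne_nil s.toList ['-'] hmap.symm
  have hnosep : ∀ x ∈ parts, '-' ∉ x.toList := by
    intro x hx
    exact splitOn_no_sep s.toList x.toList (hmap ▸ List.mem_map_of_mem hx)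
  -- head of A's list: the final current
  have hlast := fold1_last parts [] "" hpn
  have hAne : (parts.foldl stepA ([], "")).1 ≠ [] := by
    intro h; rw [h] at hlast; simp at hlast
  have hA : ((parts.foldl stepA ([], "")).1.reverse ++ ["通用"]).head?
      = some ((parts.foldl stepA ([], "")).2) := by
    rw [List.head?_append_of_ne_nil _ (by simpa using hAne), List.head?_reverse, hlast]
  -- head of B's list: the join of all parts, i.e. s itself
  obtain ⟨m, hm⟩ : ∃ m, parts.length = m + 1 := by
    cases parts with
    | nil => exact absurd rfl hpn
    | cons a l => exact ⟨l.length, by simp⟩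
  have hB : (((PySem.List.pyRange (parts.length : Int) 0 (-1)).map
        (fun i => PySem.Str.join "-" (PySem.List.slice parts none (some i)))) ++ ["通用"]).head?
      = some (PySem.Str.join "-" parts) := by
    rw [altList parts, hm, List.range_succ, List.map_append, List.reverse_append]
    simp only [List.map_cons, List.map_nil, List.reverse_cons, List.reverse_nil, List.nil_append,
      List.cons_append, List.head?_cons, Option.some.injEq]
    rw [show m + 1 = parts.length from hm.symm, List.take_length]
  have hheads := congrArg List.head? heq
  rw [hA, hB] at hheads
  have hcur2 : ((parts.foldl stepA ([], "")).2).toList.head? ≠ some '-' :=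
    fold2_head parts [] "" hnosep (by simp)
  apply hcur2
  rw [Option.some.inj hheads]
  rw [show (PySem.Str.join "-" parts).toList = s.toList from by
    rw [PySem.Str.toList_join, show ("-" : String).toList = ['-'] from rfl, hmap,
      join_splitOn s.toList ['-'] (by simp)]]
  exact hD

-- ===== VERDICT (by name: the statement is the Claim_ definition above) =====
theorem get_wbs_inheritance_spec : Claim_unchanged_get_wbs_inheritance := by
  intro s _ hnD
  unfold get_wbs_inheritance get_wbs_inheritance_alt
  split
  · rfl
  · rename_i hguard
    have hs1 : s ≠ "" := fun h => hguard (Or.inl h)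
    obtain ⟨p, t, hpt, hp⟩ := parts_head s hs1 hnD
    simp only [hpt]
    rw [foldA p t hp, ← hpt, altList ((PySem.Str.split? s "-").getD []), hpt]

theorem get_wbs_inheritance_changed : Claim_changed_get_wbs_inheritance := by
  unfold Claim_changed_get_wbs_inheritance; decide

theorem get_wbs_inheritance_tight : Claim_exact_get_wbs_inheritance := by
  intro s _ hD
  exact get_wbs_inheritance_tight_aux s hD
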